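-- pv_equiv track=rewrite | github.com/dongsub-joung/programmers | python/N120835.py | solution_try1
-- ===== SOURCE A (Python) =====
-- def solution_try1(emergency: list)->list:
--     answer = []
--
--     for i in range(len(emergency), 0,-1):
--         maxing= max(emergency)
--         idx= emergency.index(maxing)
--         answer.insert(idx, i)
--         emergency.pop(idx)
--
--     return answer
-- ===== SOURCE B (Python) =====
-- def solution_try1(emergency: list) -> list:
--     # Alternative: one stable argsort by descending value replaces the repeated
--     # max/index scans of the shrinking list; the insert position is recovered as
--     # j - (number of already-ranked original indices below j).
--     # (Unlike A, this does not empty the input list in place.)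
--     n = len(emergency)
--     order = sorted(range(n), key=lambda i: (-emergency[i], i))
--     answer = []
--     used = []
--     for t, j in enumerate(order):
--         k = sum(u < j for u in used)
--         used.append(j)
--         answer.insert(j - k, n - t)
--     return answer
-- ===== Notes on version B (the rewrite author's own statement) =====
-- stated objective: alternative
-- what changed: Instead of repeatedly scanning the shrinking list for its max and that max's first index, B sorts the indices once by (-value, index) and recovers each insert position arithmetically as j minus the count of already-ranked indices below j.
import Mathlib
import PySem

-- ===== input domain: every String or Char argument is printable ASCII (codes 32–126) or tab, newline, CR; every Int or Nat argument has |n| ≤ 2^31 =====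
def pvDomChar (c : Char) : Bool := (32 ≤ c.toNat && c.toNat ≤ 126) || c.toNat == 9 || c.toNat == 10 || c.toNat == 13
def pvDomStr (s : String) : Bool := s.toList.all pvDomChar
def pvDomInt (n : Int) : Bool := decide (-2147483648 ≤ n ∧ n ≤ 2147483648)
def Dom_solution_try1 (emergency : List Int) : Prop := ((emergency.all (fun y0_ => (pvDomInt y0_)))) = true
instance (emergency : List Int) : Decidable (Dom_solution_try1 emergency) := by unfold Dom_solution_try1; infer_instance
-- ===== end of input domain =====

-- B replaces A's repeated max/index scans by one argsort by (-value, index) plus an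
-- arithmetic recovery of each insert position (objective: alternative algorithm).
-- Python's A empties its argument list in place; the equivalence proved here is about
-- the RETURN value only (B does not mutate its argument).

-- ===== PORT A =====
-- loop body: maxing = max(emergency); idx = emergency.index(maxing);
--            answer.insert(idx, i); emergency.pop(idx)
def stepA_solution (st : List Int × List Int) (i : Int) : List Int × List Int :=
  match PySem.List.max? st.1 (fun x => x) with
  | none => st          -- unreachable (max([]) would raise; the list is never empty here)
  | some maxing =>
    match PySem.List.index? st.1 maxing with
    | none => st        -- unreachable (maxing is an element of the list)
    | some idx =>
      let answer := PySem.List.insert st.2 (idx : Int) i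
      match PySem.List.pop? st.1 (idx : Int) with
      | none => (st.1, answer)   -- unreachable (idx is in range)
      | some r => (r.2, answer)

def solution_try1 (emergency : List Int) : List Int :=
  ((PySem.List.pyRange (PySem.List.len emergency) 0 (-1)).foldl stepA_solution (emergency, [])).2

-- ===== PORT B =====
-- loop body: k = sum(u < j for u in used); used.append(j); answer.insert(j - k, n - t)
def stepB_solution (n : Int) (st : List Int × List Int) (tj : Int × Int) : List Int × List Int :=
  let k : Int := st.1.foldl (fun acc u => if u < tj.2 then acc + 1 else acc) 0
  (st.1 ++ [tj.2], PySem.List.insert st.2 (tj.2 - k) (n - tj.1))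

def solution_try1_alt (emergency : List Int) : List Int :=
  let n := PySem.List.len emergency
  let order := PySem.List.sorted2 (PySem.List.pyRange 0 n 1)
      (fun i => -(PySem.List.pyGetD emergency i 0)) (fun i => i) false
  ((PySem.List.enumerate order 0).foldl (stepB_solution n) ([], [])).2

-- ===== PRECONDITION & SPEC =====
def Spec_solution_try1 (emergency : List Int) (out : List Int) : Prop := out = solution_try1_alt emergency
instance (emergency : List Int) (out : List Int) : Decidable (Spec_solution_try1 emergency out) := by unfold Spec_solution_try1; infer_instance

-- ===== CLAIM (what is proved, stated in full; the proofs are below) =====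
def Claim_equal_solution_try1 : Prop := ∀ (emergency : List Int), Dom_solution_try1 emergency → Spec_solution_try1 emergency (solution_try1 emergency)

-- ===== LEMMAS AND PROOFS =====

-- the lexicographic "strictly before" order of B's sort: (-e[a], a) < (-e[b], b)
def pvBef (e : List Int) (a b : Int) : Bool :=
  decide ((fun i => -(PySem.List.pyGetD e i 0)) a < (fun i => -(PySem.List.pyGetD e i 0)) b) ||
  (!decide ((fun i => -(PySem.List.pyGetD e i 0)) b < (fun i => -(PySem.List.pyGetD e i 0)) a) &&
   decide ((fun i => i) a < (fun i => i) b))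

def pvR (e : List Int) (a b : Int) : Prop := pvBef e a b = true

lemma pvR_iff (e : List Int) (a b : Int) :
    pvR e a b ↔ (-(PySem.List.pyGetD e a 0) < -(PySem.List.pyGetD e b 0) ∨
      (PySem.List.pyGetD e a 0 = PySem.List.pyGetD e b 0 ∧ a < b)) := by
  simp only [pvR, pvBef, Bool.or_eq_true, Bool.and_eq_true, Bool.not_eq_true',
    decide_eq_true_iff, decide_eq_false_iff_not]
  omega

lemma pvR_trans (e : List Int) {a b c : Int} (h1 : pvR e a b) (h2 : pvR e b c) : pvR e a c := by
  rw [pvR_iff] at h1 h2 ⊢; omega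

lemma pvR_trich (e : List Int) {a b : Int} (h : a ≠ b) : pvR e a b ∨ pvR e b a := by
  rw [pvR_iff, pvR_iff]; omega

lemma pvR_irrefl (e : List Int) (a : Int) : ¬ pvR e a a := by
  rw [pvR_iff]; omega

lemma insertBy_pairwise_pvR (e : List Int) (x : Int) :
    ∀ (ys : List Int), ys.Pairwise (pvR e) → x ∉ ys →
    (PySem.List.insertBy (pvBef e) x ys).Pairwise (pvR e) := by
  intro ys
  induction ys with
  | nil => intro _ _; simp [PySem.List.insertBy]
  | cons y t ih =>
    intro hp hx
    rw [List.pairwise_cons] at hp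
    obtain ⟨hy, hpt⟩ := hp
    by_cases hb : pvBef e x y = true
    · rw [show PySem.List.insertBy (pvBef e) x (y :: t) = x :: y :: t from by
        simp [PySem.List.insertBy, hb]]
      refine List.Pairwise.cons ?_ (List.Pairwise.cons hy hpt)
      intro z hz
      rcases List.mem_cons.mp hz with rfl | hz'
      · exact hb
      · exact pvR_trans e hb (hy z hz')
    · rw [show PySem.List.insertBy (pvBef e) x (y :: t) = y :: PySem.List.insertBy (pvBef e) x t from by
        simp [PySem.List.insertBy, hb]]
      refine List.Pairwise.cons ?_ (ih hpt (fun h => hx (List.mem_cons_of_mem _ h)))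
      intro z hz
      rcases (PySem.List.insertBy_mem_iff (pvBef e) x z t).mp hz with hzx | hz'
      · subst hzx
        rcases pvR_trich e (show z ≠ y from fun h => hx (by simp [h])) with h | h
        · exact absurd h hb
        · exact h
      · exact hy z hz'

lemma foldl_insertBy_pairwise_pvR (e : List Int) :
    ∀ (xs acc : List Int), acc.Pairwise (pvR e) → (∀ x ∈ xs, x ∉ acc) → xs.Nodup →
    (xs.foldl (fun a x => PySem.List.insertBy (pvBef e) x a) acc).Pairwise (pvR e) := by
  intro xs
  induction xs with
  | nil => intro acc h _ _; simpa using h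
  | cons x t ih =>
    intro acc hacc hnot hnd
    simp only [List.foldl_cons]
    apply ih
    · exact insertBy_pairwise_pvR e x acc hacc (hnot x (by simp))
    · intro z hz hmem
      rcases (PySem.List.insertBy_mem_iff (pvBef e) x z acc).mp hmem with hzx | h
      · subst hzx; exact (List.nodup_cons.mp hnd).1 hz
      · exact hnot z (by simp [hz]) h
    · exact (List.nodup_cons.mp hnd).2

lemma order_pairwise (e : List Int) (n : Int) :
    (PySem.List.sorted2 (PySem.List.pyRange 0 n 1)
      (fun i => -(PySem.List.pyGetD e i 0)) (fun i => i) false).Pairwise (pvR e) := by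
  have h : PySem.List.sorted2 (PySem.List.pyRange 0 n 1)
      (fun i => -(PySem.List.pyGetD e i 0)) (fun i => i) false
      = (PySem.List.pyRange 0 n 1).foldl (fun a x => PySem.List.insertBy (pvBef e) x a) [] := rfl
  rw [h]
  exact foldl_insertBy_pairwise_pvR e _ [] List.Pairwise.nil (by simp) (PySem.List.nodup_pyRange_one 0 n)

lemma eraseIdx_append_cons {α : Type} : ∀ (l : List α) (a : α) (r : List α),
    (l ++ a :: r).eraseIdx l.length = l ++ r := by
  intro l a r
  induction l with
  | nil => rfl
  | cons x t ih => simp [ih]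


lemma filter_mem_split (rs : List Int) : ∀ (l : List Int),
    (l.filter (fun i => decide (i ∉ rs))).length + (l.filter (fun i => decide (i ∈ rs))).length
      = l.length := by
  intro l
  induction l with
  | nil => rfl
  | cons a t iht =>
    simp only [decide_not] at iht ⊢
    by_cases h : a ∈ rs <;> simp [List.filter_cons, h] <;> omega

lemma foldl_count_lt (j : Int) : ∀ (l : List Int) (a : Int),
    l.foldl (fun acc u => if u < j then acc + 1 else acc) a
      = a + (l.countP (fun u => decide (u < j)) : Int) := by
  intro l
  induction l with
  | nil => intro a; simp
  | cons u t iht =>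
    intro a
    by_cases h : u < j <;> simp [List.foldl_cons, List.countP_cons, h, iht] <;> push_cast <;> ring

lemma stepA_eval (em ans : List Int) (i m : Int) (k : Nat) (v : Int) (em' : List Int)
    (hm : PySem.List.max? em (fun x => x) = some m)
    (hi : PySem.List.index? em m = some k)
    (hp : PySem.List.pop? em (k : Int) = some (v, em')) :
    stepA_solution (em, ans) i = (em', PySem.List.insert ans (k : Int) i) := by
  rw [PySem.List.index?_eq_idxOf?] at hi
  simp [stepA_solution, hm, hi, hp]

-- the main loop invariant: with rest the unprocessed suffix of the sort order,
-- A's remaining list is the original values at the ascending remaining indices,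
-- and B's `used` is (a permutation of) the processed indices.
lemma loop_eq (e : List Int) :
    ∀ (rest answer : List Int) (s : Int) (used : List Int),
    rest.Pairwise (pvR e) →
    (∀ j ∈ rest, 0 ≤ j ∧ j < (e.length : Int)) →
    s + rest.length = (e.length : Int) →
    used.Perm ((PySem.List.pyRange 0 (e.length : Int) 1).filter (fun i => decide (i ∉ rest))) →
    ((PySem.List.pyRange (rest.length : Int) 0 (-1)).foldl stepA_solution
        (((PySem.List.pyRange 0 (e.length : Int) 1).filter (fun i => decide (i ∈ rest))).map
          (fun i => PySem.List.pyGetD e i 0), answer)).2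
    = ((PySem.List.enumerate rest s).foldl (stepB_solution (e.length : Int)) (used, answer)).2 := by
  intro rest
  induction rest with
  | nil =>
    intro answer s used _ _ _ _
    rw [show ((([] : List Int).length : Int)) = 0 from rfl,
        PySem.List.pyRange_neg_one_eq_nil (by omega)]
    simp [PySem.List.enumerate]
  | cons j rs ih =>
    intro answer s used hp hbd hs hperm
    have hj := hbd j (by simp)
    have hpc := List.pairwise_cons.mp hp
    have hjrs : j ∉ rs := fun h => pvR_irrefl e j (hpc.1 j h)
    have hsplit : PySem.List.pyRange 0 (e.length : Int) 1
        = PySem.List.pyRange 0 j 1 ++ j :: PySem.List.pyRange (j+1) (e.length : Int) 1 := by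
      rw [PySem.List.pyRange_one_append 0 j (e.length : Int) hj.1 (le_of_lt hj.2),
          PySem.List.pyRange_one_cons hj.2]
    -- the four filtered pieces around j
    set A1 := PySem.List.pyRange 0 j 1 with hA1
    set A2 := PySem.List.pyRange (j+1) (e.length : Int) 1 with hA2
    have hA1lt : ∀ x ∈ A1, x < j := fun x hx => (PySem.List.mem_pyRange_one.mp hx).2
    have hA2gt : ∀ x ∈ A2, j < x := fun x hx => by
      have := (PySem.List.mem_pyRange_one.mp hx).1; omega
    set G1 := A1.filter (fun i => decide (i ∈ rs)) with hG1
    set G2 := A2.filter (fun i => decide (i ∈ rs)) with hG2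
    set F1 := A1.filter (fun i => decide (i ∉ rs)) with hF1
    set F2 := A2.filter (fun i => decide (i ∉ rs)) with hF2
    have hcongr1 : ∀ (x : Int), x ∈ A1 → (decide (x ∈ j :: rs) = decide (x ∈ rs)) := by
      intro x hx
      have := hA1lt x hx
      simp only [List.mem_cons]
      have : x ≠ j := by omega
      simp [this]
    have hcongr1' : ∀ (x : Int), x ∈ A1 → (decide (x ∉ j :: rs) = decide (x ∉ rs)) := by
      intro x hx; have h := hcongr1 x hx
      simp only [decide_not, h]
    have hcongr2 : ∀ (x : Int), x ∈ A2 → (decide (x ∈ j :: rs) = decide (x ∈ rs)) := by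
      intro x hx
      have := hA2gt x hx
      simp only [List.mem_cons]
      have : x ≠ j := by omega
      simp [this]
    have hcongr2' : ∀ (x : Int), x ∈ A2 → (decide (x ∉ j :: rs) = decide (x ∉ rs)) := by
      intro x hx; have h := hcongr2 x hx
      simp only [decide_not, h]
    have hG : (PySem.List.pyRange 0 (e.length : Int) 1).filter (fun i => decide (i ∈ j :: rs))
        = G1 ++ j :: G2 := by
      rw [hsplit, List.filter_append, List.filter_cons, List.filter_congr hcongr1,
          List.filter_congr hcongr2, if_pos (show decide (j ∈ j :: rs) = true by simp)]
    have hGrs : (PySem.List.pyRange 0 (e.length : Int) 1).filter (fun i => decide (i ∈ rs))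
        = G1 ++ G2 := by
      rw [hsplit, List.filter_append, List.filter_cons,
          if_neg (show ¬ decide (j ∈ rs) = true by simp [hjrs])]
    have hF : (PySem.List.pyRange 0 (e.length : Int) 1).filter (fun i => decide (i ∉ j :: rs))
        = F1 ++ F2 := by
      rw [hsplit, List.filter_append, List.filter_cons, List.filter_congr hcongr1',
          List.filter_congr hcongr2', if_neg (show ¬ decide (j ∉ j :: rs) = true by simp)]
    have hFrs : (PySem.List.pyRange 0 (e.length : Int) 1).filter (fun i => decide (i ∉ rs))
        = F1 ++ j :: F2 := by
      rw [hsplit, List.filter_append, List.filter_cons,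
          if_pos (show decide (j ∉ rs) = true by simp [hjrs])]
    -- values: everything in G1 is strictly below the max, everything ≤ it
    have hlt : ∀ x ∈ G1, PySem.List.pyGetD e x 0 < PySem.List.pyGetD e j 0 := by
      intro x hx
      obtain ⟨hxa, hxr⟩ := List.mem_filter.mp hx
      have h1 := hA1lt x hxa
      have h2 := (pvR_iff e j x).mp (hpc.1 x (by simpa using hxr))
      omega
    have hub : ∀ x ∈ G1 ++ j :: G2, PySem.List.pyGetD e x 0 ≤ PySem.List.pyGetD e j 0 := by
      intro x hx
      rcases List.mem_append.mp hx with h | h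
      · exact le_of_lt (hlt x h)
      · rcases List.mem_cons.mp h with rfl | h
        · exact le_refl _
        · obtain ⟨hxa, hxr⟩ := List.mem_filter.mp h
          have h2 := (pvR_iff e j x).mp (hpc.1 x (by simpa using hxr))
          omega
    -- the A-side list and one step of A
    have hemdef : ((PySem.List.pyRange 0 (e.length : Int) 1).filter
          (fun i => decide (i ∈ j :: rs))).map (fun i => PySem.List.pyGetD e i 0)
        = G1.map (fun i => PySem.List.pyGetD e i 0)
          ++ PySem.List.pyGetD e j 0 :: G2.map (fun i => PySem.List.pyGetD e i 0) := by
      rw [hG, List.map_append, List.map_cons]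
    have hmax : PySem.List.max? (G1.map (fun i => PySem.List.pyGetD e i 0)
          ++ PySem.List.pyGetD e j 0 :: G2.map (fun i => PySem.List.pyGetD e i 0))
          (fun x => x) = some (PySem.List.pyGetD e j 0) := by
      cases hm : PySem.List.max? (G1.map (fun i => PySem.List.pyGetD e i 0)
          ++ PySem.List.pyGetD e j 0 :: G2.map (fun i => PySem.List.pyGetD e i 0)) (fun x => x) with
      | none =>
        rw [PySem.List.max?_eq_none_iff] at hm
        exact absurd hm (by simp)
      | some m =>
        have hmem := PySem.List.max?_mem hm
        have hismax := PySem.List.max?_isMax hm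
        have h1 : m ≤ PySem.List.pyGetD e j 0 := by
          rcases List.mem_append.mp hmem with h | h
          · obtain ⟨x, hx, rfl⟩ := List.mem_map.mp h
            exact le_of_lt (hlt x hx)
          · rcases List.mem_cons.mp h with rfl | h
            · exact le_refl _
            · obtain ⟨x, hx, rfl⟩ := List.mem_map.mp h
              exact hub x (by simp [hx])
        have h2 : PySem.List.pyGetD e j 0 ≤ m := hismax _ (by simp)
        exact congrArg some (by omega)
    have hidx : PySem.List.index? (G1.map (fun i => PySem.List.pyGetD e i 0)
          ++ PySem.List.pyGetD e j 0 :: G2.map (fun i => PySem.List.pyGetD e i 0))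
          (PySem.List.pyGetD e j 0)
        = some (G1.map (fun i => PySem.List.pyGetD e i 0)).length := by
      rw [PySem.List.index?_eq_some_iff]
      refine ⟨G1.map (fun i => PySem.List.pyGetD e i 0),
        G2.map (fun i => PySem.List.pyGetD e i 0), rfl, rfl, ?_⟩
      intro hmem
      obtain ⟨x, hx, hfx⟩ := List.mem_map.mp hmem
      exact absurd hfx (ne_of_lt (hlt x hx))
    have hklt : (G1.map (fun i => PySem.List.pyGetD e i 0)).length
        < (G1.map (fun i => PySem.List.pyGetD e i 0)
          ++ PySem.List.pyGetD e j 0 :: G2.map (fun i => PySem.List.pyGetD e i 0)).length := by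
      simp
    have hpop := PySem.List.pop?_natCast (G1.map (fun i => PySem.List.pyGetD e i 0)
          ++ PySem.List.pyGetD e j 0 :: G2.map (fun i => PySem.List.pyGetD e i 0))
          (G1.map (fun i => PySem.List.pyGetD e i 0)).length hklt
    rw [eraseIdx_append_cons] at hpop
    -- positions: |A1| = j splits as |F1| + |G1|
    have hlenA1 : ((A1.length : Int)) = j := by
      rw [hA1, PySem.List.length_pyRange_one]; omega
    have hlenFG : F1.length + G1.length = A1.length := filter_mem_split rs A1
    have hkeq : j - (F1.length : Int) = ((G1.map (fun i => PySem.List.pyGetD e i 0)).length : Int) := by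
      rw [List.length_map]; omega
    -- the B-side count
    have hcount : used.countP (fun u => decide (u < j)) = F1.length := by
      rw [hperm.countP_eq, hF, List.countP_append]
      have hone : F1.countP (fun u => decide (u < j)) = F1.length :=
        List.countP_eq_length.mpr (fun a ha => by
          have := hA1lt a (List.mem_filter.mp ha).1; simpa using this)
      have hzero : F2.countP (fun u => decide (u < j)) = 0 :=
        List.countP_eq_zero.mpr (fun a ha => by
          have := hA2gt a (List.mem_filter.mp ha).1; simp; omega)
      omega
    -- peel one iteration on each side
    have hlenrest : (((j :: rs).length : Int)) = (rs.length : Int) + 1 := by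
      simp
    rw [hlenrest, PySem.List.pyRange_neg_one_cons (by positivity),
        show ((rs.length : Int) + 1 - 1) = (rs.length : Int) by ring,
        PySem.List.enumerate_cons]
    simp only [List.foldl_cons]
    rw [hemdef, stepA_eval _ answer _ _ _ _ _ hmax hidx hpop]
    have hstepB : stepB_solution (e.length : Int) (used, answer) (s, j)
        = (used ++ [j], PySem.List.insert answer
            (((G1.map (fun i => PySem.List.pyGetD e i 0)).length : Int)) ((rs.length : Int) + 1)) := by
      simp only [stepB_solution]
      rw [foldl_count_lt]
      congr 2
      · rw [hcount]; omega
      · push_cast at hs ⊢; omega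
    rw [hstepB]
    have hemnext : G1.map (fun i => PySem.List.pyGetD e i 0) ++ G2.map (fun i => PySem.List.pyGetD e i 0)
        = ((PySem.List.pyRange 0 (e.length : Int) 1).filter
            (fun i => decide (i ∈ rs))).map (fun i => PySem.List.pyGetD e i 0) := by
      rw [hGrs, List.map_append]
    rw [hemnext]
    apply ih
    · exact hpc.2
    · exact fun x hx => hbd x (by simp [hx])
    · push_cast at hs ⊢; omega
    · rw [hFrs]
      have h1 : used.Perm (F1 ++ F2) := hF ▸ hperm
      have h3 : ((F1 ++ F2) ++ [j]).Perm (F1 ++ (j :: F2)) := by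
        rw [List.append_assoc]
        exact List.Perm.append_left F1 (List.perm_append_singleton j F2)
      exact (h1.append_right [j]).trans h3

-- ===== VERDICT (by name: the statement is the Claim_ definition above) =====
theorem solution_try1_spec : Claim_equal_solution_try1 := by
  unfold Claim_equal_solution_try1
  intro e _
  unfold Spec_solution_try1 solution_try1 solution_try1_alt
  simp only [PySem.List.len_eq]
  have hperm := PySem.List.sorted2_perm (PySem.List.pyRange 0 (e.length : Int) 1)
      (fun i => -(PySem.List.pyGetD e i 0)) (fun i => i) false
  have hlen : (PySem.List.sorted2 (PySem.List.pyRange 0 (e.length : Int) 1)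
      (fun i => -(PySem.List.pyGetD e i 0)) (fun i => i) false).length = e.length := by
    rw [hperm.length_eq, PySem.List.length_pyRange_one]; omega
  have hmem : ∀ x, x ∈ PySem.List.sorted2 (PySem.List.pyRange 0 (e.length : Int) 1)
      (fun i => -(PySem.List.pyGetD e i 0)) (fun i => i) false ↔ (0 ≤ x ∧ x < (e.length : Int)) :=
    fun x => by rw [hperm.mem_iff, PySem.List.mem_pyRange_one]
  have h := loop_eq e (PySem.List.sorted2 (PySem.List.pyRange 0 (e.length : Int) 1)
      (fun i => -(PySem.List.pyGetD e i 0)) (fun i => i) false) [] 0 []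
    (order_pairwise e (e.length : Int))
    (fun j hj => (hmem j).mp hj)
    (by rw [hlen]; ring)
    (by
      rw [List.filter_eq_nil_iff.mpr (fun a ha => by
        simp only [decide_eq_true_iff, not_not]
        exact (hmem a).mpr (PySem.List.mem_pyRange_one.mp ha))])
  rw [hlen] at h
  rw [List.filter_eq_self.mpr (fun a ha => by
        simp only [decide_eq_true_iff]
        exact (hmem a).mpr (PySem.List.mem_pyRange_one.mp ha))] at h
  rw [show List.map (fun i => PySem.List.pyGetD e i 0) (PySem.List.pyRange 0 (e.length : Int) 1) = e from by
        have := PySem.List.map_pyGetD_pyRange_zero e 0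
        simpa [PySem.List.len_eq] using this] at h
  exact h
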